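-- pv_equiv track=rewrite | github.com/Davidsondev12/Devoir-S1 | projet exo2.py | supp_redondance
-- ===== SOURCE A (Python) =====
-- def est_derive(a, b):
--     """
--     Vérifie si l'implicant 'a' peut être dérivé de l'implicant 'b'.
--     """
--     for bit_idx in range(len(a)):
--         if a[bit_idx] != b[bit_idx] and a[bit_idx] != "-":
--             return False
--     return True
--
-- def supp_redondance(term_arr):
--     """
--     Supprime les redondances dans une liste d'implicants.
--     """
--     new_list = []
--     for term1_idx in range(len(term_arr)):
--         if term_arr[term1_idx] not in new_list:
--             new_list.append(term_arr[term1_idx])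
--     indexes_to_remove = []
--     for term1_idx in range(len(new_list)):
--         for term2_idx in range(len(new_list)):
--             if term1_idx != term2_idx and est_derive(new_list[term1_idx], new_list[term2_idx]):
--                 indexes_to_remove.append(term2_idx)
--     indexes_to_remove = list(dict.fromkeys(indexes_to_remove))
--     indexes_to_remove.sort()
--     for idx in reversed(range(len(indexes_to_remove))):
--         del new_list[indexes_to_remove[idx]]
--     return new_list
-- ===== SOURCE B (Python) =====
-- def est_derive(a, b):
--     """
--     Vérifie si l'implicant 'a' peut être dérivé de l'implicant 'b'.
--     """
--     for bit_idx in range(len(a)):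
--         if a[bit_idx] != b[bit_idx] and a[bit_idx] != "-":
--             return False
--     return True
--
-- def supp_redondance(term_arr):
--     """
--     Une seule passe sur la liste d'origine: on garde la première occurrence
--     de chaque valeur dont aucune AUTRE valeur de la liste ne la dérive.
--     Pas de liste dédupliquée intermédiaire, pas d'indices, pas de tri ni de
--     suppression: le résultat est construit directement par valeur.
--     """
--     result = []
--     seen = set()
--     for t in term_arr:
--         if t not in seen:
--             seen.add(t)
--             if not any(u != t and est_derive(u, t) for u in term_arr):
--                 result.append(t)
--     return result
-- ===== Notes on version B (the rewrite author's own statement) =====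
-- stated objective: simpler
-- what changed: A's four staged passes (build a deduplicated list, double index loop collecting removal indices, dedup+sort the indices, delete them in reverse) are replaced by ONE pass over the original input with an accumulator and a seen-set: each first occurrence t is appended iff no other value u != t in the input derives it; no intermediate deduplicated list, no index bookkeeping, no sorting, no deletion.
import Mathlib
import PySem

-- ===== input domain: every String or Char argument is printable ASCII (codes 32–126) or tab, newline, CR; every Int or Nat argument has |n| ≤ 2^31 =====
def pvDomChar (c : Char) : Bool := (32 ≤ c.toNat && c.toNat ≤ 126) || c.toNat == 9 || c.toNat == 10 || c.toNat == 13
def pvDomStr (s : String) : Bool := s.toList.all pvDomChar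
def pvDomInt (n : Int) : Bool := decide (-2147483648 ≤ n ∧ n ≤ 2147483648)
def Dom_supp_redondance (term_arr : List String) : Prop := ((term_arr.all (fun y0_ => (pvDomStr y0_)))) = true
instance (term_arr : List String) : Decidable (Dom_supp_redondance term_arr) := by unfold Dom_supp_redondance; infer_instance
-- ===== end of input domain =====

-- B replaces A's four staged passes (dedup list, index-pair scan collecting removal indices,
-- dedup+sort of indices, delete in reverse) by ONE pass over the input with an accumulator and
-- a seen-set, keeping each first occurrence no other value derives (simpler shape, same cost).


-- ===== PORT A =====
-- shared helper: est_derive of the Python module, used verbatim by both programs.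
-- The early-return loop is the `all` of the negated test; indexing via getD is exact under
-- Pre_ (equal lengths keep every access in range where Python would not raise).
def est_derive (a b : String) : Bool :=
  (List.range a.toList.length).all (fun bit_idx =>
    !(a.toList.getD bit_idx ' ' != b.toList.getD bit_idx ' ' &&
      a.toList.getD bit_idx ' ' != '-'))

def supp_redondance (term_arr : List String) : List String :=
  let new_list := term_arr.foldl (fun acc t => if t ∈ acc then acc else acc ++ [t]) []
  let idxs := (List.range new_list.length).foldl (fun acc i =>
      (List.range new_list.length).foldl (fun acc2 j =>
        if i ≠ j ∧ est_derive (new_list.getD i "") (new_list.getD j "") = true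
        then acc2 ++ [j] else acc2) acc) []
  let idxs2 := PySem.List.dedup idxs
  let sortedIdxs := PySem.List.sorted idxs2 (fun x => x) false
  (List.range sortedIdxs.length).reverse.foldl
    (fun l k => l.eraseIdx (sortedIdxs.getD k 0)) new_list

-- ===== PORT B =====
-- one pass: state = (result so far, seen-set); a first occurrence t is appended iff
-- no other value u ≠ t in the input derives it.
def supp_redondance_alt (term_arr : List String) : List String :=
  (term_arr.foldl (fun (st : List String × PySem.Set String) t =>
      if PySem.Set.contains st.2 t then st
      else
        let seen := PySem.Set.add st.2 t
        if term_arr.any (fun u => u != t && est_derive u t) then (st.1, seen)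
        else (st.1 ++ [t], seen))
    ([], PySem.Set.empty)).1

-- ===== PRECONDITION & SPEC =====
-- Pre_ excludes exactly the inputs on which A raises IndexError: some distinct pair s, t with
-- s longer than t and no mismatch of s against t inside t's length (est_derive s t then reads
-- t past its end). On every other input A returns normally.
def Pre_supp_redondance (term_arr : List String) : Prop :=
  ∀ s ∈ term_arr, ∀ t ∈ term_arr, s ≠ t →
    s.toList.length ≤ t.toList.length ∨
    ∃ i < t.toList.length, s.toList.getD i ' ' ≠ t.toList.getD i ' ' ∧ s.toList.getD i ' ' ≠ '-'
instance (term_arr : List String) : Decidable (Pre_supp_redondance term_arr) := by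
  unfold Pre_supp_redondance; infer_instance
def pvWitness_supp_redondance : List String := ["0-", "01", "11", "01"]

def Spec_supp_redondance (term_arr : List String) (out : List String) : Prop := out = supp_redondance_alt term_arr
instance (term_arr : List String) (out : List String) : Decidable (Spec_supp_redondance term_arr out) := by unfold Spec_supp_redondance; infer_instance

-- ===== CLAIM (what is proved, stated in full; the proofs are below) =====
def Claim_equal_supp_redondance : Prop := ∀ (term_arr : List String), Dom_supp_redondance term_arr → Pre_supp_redondance term_arr → Spec_supp_redondance term_arr (supp_redondance term_arr)

-- ===== LEMMAS AND PROOFS =====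

-- the value-level removal test B makes
def pKeep (term_arr : List String) (t : String) : Bool :=
  ! term_arr.any (fun u => u != t && est_derive u t)

-- the index-level removal test A makes, on indices into the deduplicated list
def badIdx (nl : List String) (j : Nat) : Bool :=
  (List.range nl.length).any (fun i =>
    decide (i ≠ j) && est_derive (nl.getD i "") (nl.getD j ""))

-- the common value both ports compute, in A's index form
def keepList (nl : List String) : List String :=
  (List.range nl.length).filterMap (fun j =>
    if badIdx nl j then none else some (nl.getD j ""))

-- A's first loop is first-occurrence deduplication
theorem dedupA_eq (xs : List String) :
    xs.foldl (fun acc t => if t ∈ acc then acc else acc ++ [t]) [] = PySem.List.dedup xs := by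
  have h : (fun (acc : List String) t => if t ∈ acc then acc else acc ++ [t]) = PySem.Set.add := by
    funext acc t
    simp [PySem.Set.add, List.contains_eq_mem]
  simp [PySem.List.dedup, PySem.Set.ofList, h, PySem.Set.empty]

-- membership in A's collected removal-index list
theorem mem_idxs (nl : List String) (j : Nat) :
    j ∈ (List.range nl.length).foldl (fun acc i =>
      (List.range nl.length).foldl (fun acc2 j =>
        if i ≠ j ∧ est_derive (nl.getD i "") (nl.getD j "") = true
        then acc2 ++ [j] else acc2) acc) [] ↔ j < nl.length ∧ badIdx nl j = true := by
  have h1 : ∀ (i : Nat) (acc : List Nat),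
      (List.range nl.length).foldl (fun acc2 j =>
        if i ≠ j ∧ est_derive (nl.getD i "") (nl.getD j "") = true
        then acc2 ++ [j] else acc2) acc
      = acc ++ (List.range nl.length).filter (fun j =>
          decide (i ≠ j) && est_derive (nl.getD i "") (nl.getD j "")) := by
    intro i acc
    rw [PySem.List.foldl_append_ite_eq_filter]
    congr 1
    apply List.filter_congr
    intro x _
    simp
  simp only [h1]
  rw [PySem.List.foldl_append_eq_flatMap]
  simp only [badIdx, List.nil_append, List.mem_flatMap, List.mem_filter, List.mem_range,
    List.any_eq_true]
  constructor
  · rintro ⟨i, hi, hj, hc⟩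
    exact ⟨hj, i, by simpa using hi, hc⟩
  · rintro ⟨hj, i, hi, hc⟩
    exact ⟨i, by simpa using hi, hj, hc⟩

-- dedup + sort of any list with that membership is the increasing filter of range
theorem sorted_idxs (nl : List String) (L : List Nat)
    (h : ∀ j, j ∈ L ↔ j < nl.length ∧ badIdx nl j = true) :
    PySem.List.sorted (PySem.List.dedup L) (fun x => x) false
      = (List.range nl.length).filter (fun j => badIdx nl j) := by
  apply PySem.List.sorted_eq_of_perm_of_pairwise_lt
  · rw [List.perm_ext_iff_of_nodup (List.Nodup.filter _ (List.nodup_range))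
        (PySem.List.nodup_dedup L)]
    intro a
    simp [h]
  · exact List.Pairwise.filter _ (List.pairwise_lt_range)

theorem map_getD_range {α : Type} (S : List α) (d : α) :
    (List.range S.length).map (fun k => S.getD k d) = S := by
  apply List.ext_getElem
  · simp
  · intro i h1 h2
    simp [List.getD, List.getElem?_eq_getElem h2]

-- erasing at strictly decreasing positions below ys.length commutes with appending one element
theorem erase_shift (D : List Nat) : ∀ (ys : List String) (y : String),
    (∀ p ∈ D, p < ys.length) → D.Pairwise (· > ·) →
    D.foldl (fun l p => l.eraseIdx p) (ys ++ [y])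
      = D.foldl (fun l p => l.eraseIdx p) ys ++ [y] := by
  induction D with
  | nil => intro ys y _ _; rfl
  | cons p rest ih =>
    intro ys y hlt hp
    have hplt : p < ys.length := hlt p (List.mem_cons_self)
    simp only [List.foldl_cons]
    rw [List.eraseIdx_append_of_lt_length hplt]
    apply ih
    · intro q hq
      have h1 : q < p := (List.pairwise_cons.mp hp).1 q hq
      rw [List.length_eraseIdx_of_lt hplt]
      omega
    · exact (List.pairwise_cons.mp hp).2

-- deleting the f-positions back to front is keeping the non-f-positions
theorem erase_filter (f : Nat → Bool) (nl : List String) :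
    ((List.range nl.length).filter f).reverse.foldl (fun l p => l.eraseIdx p) nl
      = (List.range nl.length).filterMap (fun j =>
          if f j then none else some (nl.getD j "")) := by
  induction nl using List.reverseRecOn with
  | nil => simp
  | append_singleton ys y ih =>
    have hm : (ys ++ [y]).length = ys.length + 1 := by simp
    have hgetD : ∀ j < ys.length, (ys ++ [y]).getD j "" = ys.getD j "" := by
      intro j hj
      simp [List.getD, List.getElem?_append_left hj]
    have hfm : (List.range ys.length).filterMap (fun j =>
          if f j then none else some ((ys ++ [y]).getD j "" ))
        = (List.range ys.length).filterMap (fun j =>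
          if f j then none else some (ys.getD j "")) := by
      apply List.filterMap_congr
      intro j hj
      rw [hgetD j (List.mem_range.mp hj)]
    rw [hm, List.range_succ, List.filter_append, List.filterMap_append, List.reverse_append,
        List.foldl_append, hfm]
    by_cases hy : f ys.length = true
    · have h1 : List.filter f [ys.length] = [ys.length] := by simp [hy]
      have h2 : List.filterMap (fun j => if f j = true then none
          else some ((ys ++ [y]).getD j "")) [ys.length] = [] := by simp [hy]
      have h3 : (ys ++ [y]).eraseIdx ys.length = ys := by
        rw [List.eraseIdx_append_of_length_le (le_refl _)]
        simp
      rw [h1, h2, List.append_nil, List.reverse_singleton, List.foldl_cons, List.foldl_nil,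
          h3, ih]
    · have h1 : List.filter f [ys.length] = [] := by simp [hy]
      have h2 : List.filterMap (fun j => if f j = true then none
          else some ((ys ++ [y]).getD j "")) [ys.length] = [(ys ++ [y]).getD ys.length ""] := by
        simp [hy]
      rw [h1, h2, List.reverse_nil, List.foldl_nil]
      rw [erase_shift]
      · rw [ih]
        have hg : (ys ++ [y]).getD ys.length "" = y := by
          simp [List.getD]
        rw [hg]
      · intro p hp
        simp only [List.mem_reverse, List.mem_filter, List.mem_range] at hp
        exact hp.1
      · exact List.pairwise_reverse.mpr (List.Pairwise.filter _ (List.pairwise_lt_range))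

theorem A_eq_keep (term_arr : List String) :
    supp_redondance term_arr = keepList (PySem.List.dedup term_arr) := by
  simp only [supp_redondance, keepList]
  rw [dedupA_eq]
  set nl := PySem.List.dedup term_arr with hnl
  rw [sorted_idxs nl _ (fun j => mem_idxs nl j)]
  set S := (List.range nl.length).filter (fun j => badIdx nl j) with hS
  have hmap : (List.range S.length).reverse.foldl (fun l k => l.eraseIdx (S.getD k 0)) nl
      = S.reverse.foldl (fun l p => l.eraseIdx p) nl := by
    conv_rhs => rw [← map_getD_range S 0]
    rw [← List.map_reverse, List.foldl_map]
  rw [hmap, hS, erase_filter]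

-- A's index test equals B's value test, on the deduplicated list
theorem badIdx_eq_pKeep (term_arr : List String) (j : Nat)
    (hj : j < (PySem.List.dedup term_arr).length) :
    badIdx (PySem.List.dedup term_arr) j
      = ! pKeep term_arr ((PySem.List.dedup term_arr).getD j "") := by
  set nl := PySem.List.dedup term_arr with hnl
  have hget : ∀ k (hk : k < nl.length), nl.getD k "" = nl[k]'hk := by
    intro k hk
    simp [List.getD, List.getElem?_eq_getElem hk]
  have hnd : nl.Nodup := PySem.List.nodup_dedup term_arr
  simp only [pKeep, Bool.not_not, badIdx]
  apply Bool.eq_iff_iff.mpr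
  simp only [List.any_eq_true, List.mem_range, decide_eq_true_eq, Bool.and_eq_true, bne_iff_ne]
  constructor
  · rintro ⟨i, hi, hij, hd⟩
    refine ⟨nl.getD i "", ?_, ?_, by simpa [hget j hj] using hd⟩
    · have : nl.getD i "" ∈ nl := by
        rw [hget i hi]; exact List.getElem_mem _
      exact (PySem.List.mem_dedup _ _).mp (hnl ▸ this)
    · rw [hget i hi, hget j hj]
      intro h
      exact hij ((List.Nodup.getElem_inj_iff hnd).mp h)
  · rintro ⟨u, hu, hne, hd⟩
    have humem : u ∈ nl := hnl ▸ (PySem.List.mem_dedup _ _).mpr hu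
    obtain ⟨i, hi, hui⟩ := List.mem_iff_getElem.mp humem
    refine ⟨i, hi, ?_, ?_⟩
    · intro h
      subst h
      exact hne (by rw [← hui, ← hget i hi])
    · rw [hget i hi, hui]
      simpa [hget j hj] using hd

theorem filterMap_if_eq_map_filter {α β : Type} (l : List α) (b : α → Bool) (g : α → β) :
    l.filterMap (fun x => if b x then none else some (g x))
      = (l.filter (fun x => ! b x)).map g := by
  induction l with
  | nil => rfl
  | cons x xs ih =>
    by_cases h : b x = true <;> simp [h, ih]

-- the common value, in B's value form
theorem keep_eq_filter (term_arr : List String) :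
    keepList (PySem.List.dedup term_arr)
      = (PySem.List.dedup term_arr).filter (pKeep term_arr) := by
  set nl := PySem.List.dedup term_arr with hnl
  rw [keepList, filterMap_if_eq_map_filter]
  have hcong : (List.range nl.length).filter (fun j => ! badIdx nl j)
      = (List.range nl.length).filter (fun j => pKeep term_arr (nl.getD j "")) := by
    apply List.filter_congr
    intro j hj
    rw [badIdx_eq_pKeep term_arr j (List.mem_range.mp hj), Bool.not_not]
  rw [hcong]
  conv_rhs => rw [← map_getD_range nl ""]
  rw [List.filter_map]
  rfl

-- "new first occurrences of xs relative to an already-seen prefix", the spine of B's pass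
def nd (seen : List String) : List String → List String
  | [] => []
  | t :: rest => if seen.contains t then nd seen rest else t :: nd (seen ++ [t]) rest

-- B's step function, named so the fold invariant can be stated and rewritten cleanly
def stepB (term_arr : List String) (st : List String × PySem.Set String) (t : String) :
    List String × PySem.Set String :=
  if PySem.Set.contains st.2 t then st
  else
    let seen := PySem.Set.add st.2 t
    if term_arr.any (fun u => u != t && est_derive u t) then (st.1, seen)
    else (st.1 ++ [t], seen)

-- B's fold is the filtered relative dedup appended to the accumulated result
theorem B_fold (term_arr : List String) : ∀ (xs : List String) (res seen : List String),
    (xs.foldl (stepB term_arr) (res, seen)).1 = res ++ (nd seen xs).filter (pKeep term_arr) := by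
  intro xs
  induction xs with
  | nil => intro res seen; simp [nd]
  | cons t rest ih =>
    intro res seen
    rw [List.foldl_cons]
    by_cases h : seen.contains t = true
    · have hm : t ∈ seen := by simpa using h
      have hstep : stepB term_arr (res, seen) t = (res, seen) := by
        simp [stepB, PySem.Set.contains, hm]
      rw [hstep, nd, if_pos h]
      exact ih res seen
    · have hm : t ∉ seen := by simpa using h
      by_cases hb : term_arr.any (fun u => u != t && est_derive u t) = true
      · have hstep : stepB term_arr (res, seen) t = (res, seen ++ [t]) := by
          simp [stepB, PySem.Set.contains, PySem.Set.add, hm, hb]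
        rw [hstep, nd, if_neg h]
        rw [ih res (seen ++ [t])]
        simp [pKeep, hb]
      · have hstep : stepB term_arr (res, seen) t = (res ++ [t], seen ++ [t]) := by
          simp [stepB, PySem.Set.contains, PySem.Set.add, hm, hb]
        rw [hstep, nd, if_neg h]
        rw [ih (res ++ [t]) (seen ++ [t])]
        simp [pKeep, hb]

-- the relative dedup with nothing seen is Python's dict.fromkeys dedup
theorem nd_spec : ∀ (xs seen : List String),
    seen ++ nd seen xs = xs.foldl PySem.Set.add seen := by
  intro xs
  induction xs with
  | nil => intro seen; simp [nd]
  | cons t rest ih =>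
    intro seen
    by_cases h : seen.contains t = true
    · have hm : t ∈ seen := by simpa using h
      have hadd : PySem.Set.add seen t = seen := by
        simp [PySem.Set.add, PySem.Set.contains, hm]
      simp only [nd, h, if_true, List.foldl_cons, hadd]
      exact ih seen
    · have hm : t ∉ seen := by simpa using h
      have hadd : PySem.Set.add seen t = seen ++ [t] := by
        simp [PySem.Set.add, PySem.Set.contains, hm]
      simp only [nd, h, List.foldl_cons, hadd]
      rw [← ih (seen ++ [t])]
      simp

theorem B_eq_filter (term_arr : List String) :
    supp_redondance_alt term_arr = (PySem.List.dedup term_arr).filter (pKeep term_arr) := by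
  have hB : supp_redondance_alt term_arr
      = (term_arr.foldl (stepB term_arr) ([], PySem.Set.empty)).1 := rfl
  rw [hB, B_fold term_arr term_arr [] PySem.Set.empty]
  have h0 : nd [] term_arr = PySem.List.dedup term_arr := by
    have := nd_spec term_arr []
    simpa [PySem.List.dedup, PySem.Set.ofList, PySem.Set.empty] using this
  simp [PySem.Set.empty, h0]

-- ===== VERDICT (by name: the statement is the Claim_ definition above) =====
theorem supp_redondance_spec : Claim_equal_supp_redondance := by
  intro term_arr _ _
  unfold Spec_supp_redondance
  rw [A_eq_keep, keep_eq_filter, B_eq_filter]
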